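-- pv_equiv track=rewrite | github.com/choco1911/try_py | projects/remstat/remstat_new/001_read_ff_regexp.py | tag_cutter
-- ===== SOURCE A (Python) =====
-- def tag_cutter(l_tagged):
--    t_start = l_tagged.find('>') + 1
--    t_end = l_tagged.find('</')
--    l_cleared = l_tagged[t_start:t_end]
--    if l_cleared.startswith('<') or l_cleared.endswith('>'):
--         return tag_cutter(l_cleared)
--    if l_cleared :
--         return l_cleared
-- ===== SOURCE B (Python) =====
-- def _strip_once(s):
--     return s[s.find('>') + 1 : s.find('</')]
--
-- def tag_cutter(l_tagged):
--     cur = _strip_once(l_tagged)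
--     while cur[:1] == '<' or cur[-1:] == '>':
--         cur = _strip_once(cur)
--     return cur if cur else None
-- ===== Notes on version B (the rewrite author's own statement) =====
-- stated objective: alternative
-- what changed: Replaces A's tail recursion with an explicit iterative loop over the progressively stripped string, factoring the strip step into a helper and writing the loop guard as one-character slice comparisons instead of startswith/endswith.
import Mathlib
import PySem

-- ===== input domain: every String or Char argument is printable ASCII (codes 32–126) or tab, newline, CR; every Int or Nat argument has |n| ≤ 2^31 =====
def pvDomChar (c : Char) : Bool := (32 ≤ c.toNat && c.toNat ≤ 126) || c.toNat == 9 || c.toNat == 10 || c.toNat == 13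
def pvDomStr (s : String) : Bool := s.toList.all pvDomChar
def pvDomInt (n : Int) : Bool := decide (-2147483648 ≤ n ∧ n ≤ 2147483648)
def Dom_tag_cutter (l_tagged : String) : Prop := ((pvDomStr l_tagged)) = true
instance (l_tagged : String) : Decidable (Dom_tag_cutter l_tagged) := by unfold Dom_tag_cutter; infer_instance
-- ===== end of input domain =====

-- B replaces A's tail recursion by an iterative loop over the progressively stripped
-- string, with the guard written as one-character slice comparisons ('alternative'; same cost).

-- termination lemma for port A's recursion (cited by name in decreasing_by)
theorem pvStrip_length_lt (s : List Char) (h : s ≠ []) :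
    (PySem.List.slice s (some (PySem.Chars.find s ['>'] + 1))
      (some (PySem.Chars.find s ['<', '/']))).length < s.length := by
  have hn : 1 ≤ s.length := List.length_pos_of_ne_nil h
  rw [PySem.List.length_slice]
  have hb := PySem.Chars.neg_one_le_find s ['<', '/']
  by_cases hlt : PySem.Chars.find s ['<', '/'] < 0
  · have : PySem.Chars.find s ['<', '/'] = -1 := by omega
    rw [this, PySem.List.clampIdx_neg_one]
    omega
  · have hge : 0 ≤ PySem.Chars.find s ['<', '/'] := by omega
    have hpre := (PySem.Chars.find_spec hge).1
    have hlen : 2 ≤ (s.drop (PySem.Chars.find s ['<', '/']).toNat).length :=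
      hpre.length_le
    rw [List.length_drop] at hlen
    have hcast : PySem.Chars.find s ['<', '/'] =
        ((PySem.Chars.find s ['<', '/']).toNat : Int) := (Int.toNat_of_nonneg hge).symm
    rw [hcast, PySem.List.clampIdx_natCast]
    omega

theorem pvGuard_ne_nil {c : List Char}
    (h : (PySem.Chars.startswith c ['<'] || PySem.Chars.endswith c ['>']) = true) :
    c ≠ [] := by
  rcases Bool.or_eq_true_iff.mp h with h1 | h1
  · have := (PySem.Chars.startswith_iff c ['<']).mp h1
    intro hnil; subst hnil; simp at this
  · have := (PySem.Chars.endswith_iff c ['>']).mp h1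
    intro hnil; subst hnil; simp at this

-- ===== PORT A =====
def tagCutA (s : List Char) : Option (List Char) :=
  let t_start : Int := PySem.Chars.find s ['>'] + 1
  let t_end : Int := PySem.Chars.find s ['<', '/']
  let l_cleared := PySem.List.slice s (some t_start) (some t_end)
  if h : (PySem.Chars.startswith l_cleared ['<'] || PySem.Chars.endswith l_cleared ['>']) = true then
    tagCutA l_cleared
  else if l_cleared ≠ [] then some l_cleared else none
termination_by s.length
decreasing_by
  have hcl := pvGuard_ne_nil h
  have hs : s ≠ [] := by
    intro hnil
    apply hcl
    apply List.eq_nil_of_length_eq_zero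
    simp only [l_cleared, t_end, t_start]
    subst hnil
    rw [PySem.List.length_slice]
    have h1 : PySem.List.clampIdx ([] : List Char).length (PySem.Chars.find ([] : List Char) ['<', '/']) = 0 :=
      Nat.le_zero.mp (PySem.List.clampIdx_le ([] : List Char).length (PySem.Chars.find ([] : List Char) ['<', '/']))
    rw [h1]
    exact Nat.zero_sub _
  exact pvStrip_length_lt s hs

def tag_cutter (l_tagged : String) : Option String :=
  (tagCutA l_tagged.toList).map String.ofList

-- ===== PORT B =====
def stripOnce (s : List Char) : List Char :=
  PySem.List.slice s (some (PySem.Chars.find s ['>'] + 1))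
    (some (PySem.Chars.find s ['<', '/']))

def tagLoopB : Nat → List Char → Option (List Char)
  | 0, _ => none
  | fuel + 1, cur =>
    if (PySem.List.slice cur none (some 1) == ['<'])
        || (PySem.List.slice cur (some (-1)) none == ['>']) then
      tagLoopB fuel (stripOnce cur)
    else if cur ≠ [] then some cur else none

def tag_cutter_alt (l_tagged : String) : Option String :=
  (tagLoopB (l_tagged.toList.length + 1) (stripOnce l_tagged.toList)).map String.ofList

-- ===== PRECONDITION & SPEC =====
def Spec_tag_cutter (l_tagged : String) (out : Option String) : Prop := out = tag_cutter_alt l_tagged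
instance (l_tagged : String) (out : Option String) : Decidable (Spec_tag_cutter l_tagged out) := by unfold Spec_tag_cutter; infer_instance

-- ===== CLAIM (what is proved, stated in full; the proofs are below) =====
def Claim_equal_tag_cutter : Prop := ∀ (l_tagged : String), Dom_tag_cutter l_tagged → Spec_tag_cutter l_tagged (tag_cutter l_tagged)

-- ===== LEMMAS AND PROOFS =====

theorem stripOnce_length_le (s : List Char) : (stripOnce s).length ≤ s.length := by
  rcases eq_or_ne s [] with h | h
  · subst h
    unfold stripOnce
    rw [PySem.List.length_slice]
    have h1 : PySem.List.clampIdx ([] : List Char).length (PySem.Chars.find ([] : List Char) ['<', '/']) = 0 :=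
      Nat.le_zero.mp (PySem.List.clampIdx_le ([] : List Char).length (PySem.Chars.find ([] : List Char) ['<', '/']))
    rw [h1, Nat.zero_sub]
    exact Nat.zero_le _
  · exact le_of_lt (pvStrip_length_lt s h)

-- the two guards are the same Bool
theorem guard_eq (c : List Char) :
    (PySem.Chars.startswith c ['<'] || PySem.Chars.endswith c ['>'])
      = ((PySem.List.slice c none (some 1) == ['<'])
          || (PySem.List.slice c (some (-1)) none == ['>'])) := by
  rw [PySem.List.slice_to c (by norm_num : (0:Int) ≤ 1), PySem.List.slice_from_neg_one]
  rw [Bool.eq_iff_iff]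
  simp only [Bool.or_eq_true, beq_iff_eq,
    PySem.Chars.startswith_iff, PySem.Chars.endswith_iff]
  constructor
  · rintro (h | h)
    · left
      have := List.prefix_iff_eq_take.mp h
      simpa using this.symm
    · right
      have := List.suffix_iff_eq_drop.mp h
      simpa using this.symm
  · rintro (h | h)
    · left
      exact List.prefix_iff_eq_take.mpr (by simpa using h.symm)
    · right
      exact List.suffix_iff_eq_drop.mpr (by simpa using h.symm)

theorem tagCutA_def (s : List Char) : tagCutA s =
    if (PySem.Chars.startswith (stripOnce s) ['<']
        || PySem.Chars.endswith (stripOnce s) ['>']) = true then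
      tagCutA (stripOnce s)
    else if stripOnce s ≠ [] then some (stripOnce s) else none := by
  rw [tagCutA]
  unfold stripOnce
  simp [dite_eq_ite]

theorem tagCutA_eq_loop : ∀ (fuel : Nat) (s : List Char),
    (stripOnce s).length < fuel → tagCutA s = tagLoopB fuel (stripOnce s) := by
  intro fuel
  induction fuel with
  | zero => intro s h; omega
  | succ n ih =>
    intro s h
    rw [tagCutA_def]
    simp only [tagLoopB]
    rw [← guard_eq (stripOnce s)]
    by_cases hg : (PySem.Chars.startswith (stripOnce s) ['<']
        || PySem.Chars.endswith (stripOnce s) ['>']) = true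
    · simp only [hg, if_pos]
      have hne := pvGuard_ne_nil hg
      have h1 : (stripOnce (stripOnce s)).length < (stripOnce s).length :=
        pvStrip_length_lt (stripOnce s) hne
      exact ih (stripOnce s) (by omega)
    · simp only [hg, if_neg, Bool.false_eq_true, not_false_iff]

-- ===== VERDICT (by name: the statement is the Claim_ definition above) =====
theorem tag_cutter_spec : Claim_equal_tag_cutter := by
  intro s _
  unfold Spec_tag_cutter tag_cutter tag_cutter_alt
  rw [tagCutA_eq_loop (s.toList.length + 1) s.toList
    (by have := stripOnce_length_le s.toList; omega)]
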